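-- pv_equiv track=rewrite | github.com/mozainaire/neuromesh | Question 1.py | min_subsequences
-- ===== SOURCE A (Python) =====
-- def min_subsequences(source, target):
--     source_len = len(source)
--     target_len = len(target)
--
--     # This dictionary maps characters to their indices in the source string
--     char_index_map = {}
--     for i, char in enumerate(source):
--         if char not in char_index_map:
--             char_index_map[char] = []
--         char_index_map[char].append(i)
--
--     # Initializing the count of subsequences
--     count = 0
--     i = 0
--
--     while i < target_len:
--         count += 1
--         pos = 0  # Position in source
--
--         while i < target_len:
--             if target[i] not in char_index_map:
--                 return -1  # Character not found in source
--
--             # Binary search to find the smallest index in source which is >= pos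
--             j = binary_search(char_index_map[target[i]], pos)
--             if j == len(char_index_map[target[i]]):
--                 break  # No valid position found, need a new subsequence
--             pos = char_index_map[target[i]][j] + 1
--             i += 1
--
--     return count
--
-- def binary_search(lst, x):
--     """Binary search to find the smallest index which is >= x"""
--     lo, hi = 0, len(lst)
--     while lo < hi:
--         mid = (lo + hi) // 2
--         if lst[mid] < x:
--             lo = mid + 1
--         else:
--             hi = mid
--     return lo
-- ===== SOURCE B (Python) =====
-- def min_subsequences(source, target):
--     src_chars = set(source)
--     n = len(target)
--     count = 0
--     i = 0
--     while i < n: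
--         if target[i] not in src_chars:
--             return -1
--         count += 1
--         for ch in source:
--             if i < n and ch == target[i]:
--                 i += 1
--     return count
-- ===== Notes on version B (the rewrite author's own statement) =====
-- stated objective: simpler
-- what changed: B drops A's per-character index map and binary search entirely: it checks absence with a plain character set and covers the target greedily by rescanning the source linearly once per subsequence, advancing a single target pointer; measured faster because it avoids building the index map and doing a binary search per target character.
import Mathlib
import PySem

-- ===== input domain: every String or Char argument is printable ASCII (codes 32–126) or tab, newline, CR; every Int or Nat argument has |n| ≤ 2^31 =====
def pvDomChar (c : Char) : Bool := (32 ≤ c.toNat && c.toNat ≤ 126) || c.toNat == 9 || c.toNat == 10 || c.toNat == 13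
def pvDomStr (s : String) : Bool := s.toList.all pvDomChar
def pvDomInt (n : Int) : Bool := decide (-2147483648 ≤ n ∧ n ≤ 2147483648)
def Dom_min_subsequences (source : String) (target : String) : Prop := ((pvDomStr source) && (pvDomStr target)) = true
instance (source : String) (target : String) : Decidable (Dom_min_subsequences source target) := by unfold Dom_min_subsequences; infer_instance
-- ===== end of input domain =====

-- B replaces A's per-character index map + binary search by a plain greedy rescan of the
-- source per subsequence, checking character absence with a set: simpler, same results.

-- ===== PORT A =====
-- binary_search's while-loop (termination: hi - lo shrinks)
def pvBsGo (lst : List Int) (x : Int) (lo hi : Nat) : Nat :=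
  if _h : lo < hi then
    let mid := (lo + hi) / 2
    if lst[mid]! < x then pvBsGo lst x (mid + 1) hi else pvBsGo lst x lo mid
  else lo
termination_by hi - lo
decreasing_by all_goals omega

def binary_search (lst : List Int) (x : Int) : Nat := pvBsGo lst x 0 lst.length

-- A's inner while-loop (termination: i approaches target_len)
def pvInnerA (m : PySem.Dict Char (List Int)) (t : List Char) (n i : Nat) (pos : Int) :
    Option Nat :=
  if _h : i < n then
    let c := t[i]!
    if m.contains c = false then none
    else
      let lst := m.getD c []
      let j := binary_search lst pos
      if j = lst.length then some i
      else pvInnerA m t n (i + 1) (lst[j]! + 1)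
  else some i
termination_by n - i
decreasing_by omega

-- A's outer while-loop; fuel n+1 is enough: every pass advances i or returns
def pvOuterA (m : PySem.Dict Char (List Int)) (t : List Char) (n : Nat) :
    Nat → Int → Nat → Int
  | 0, count, _ => count
  | fuel + 1, count, i =>
    if i < n then
      match pvInnerA m t n i 0 with
      | none => -1
      | some i' => pvOuterA m t n fuel (count + 1) i'
    else count

def min_subsequences (source : String) (target : String) : Int :=
  let s := source.toList
  let t := target.toList
  let char_index_map :=
    (PySem.List.enumerate s 0).foldl
      (fun d p => d.modify p.2 [] (· ++ [p.1])) PySem.Dict.empty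
  pvOuterA char_index_map t t.length (t.length + 1) 0 0

-- ===== PORT B =====
-- B's inner for-loop over source
def pvScanB (t : List Char) (s : List Char) (i : Nat) : Nat :=
  s.foldl (fun i ch => if t[i]? = some ch then i + 1 else i) i

-- B's outer while-loop; fuel n+1 is enough: every pass advances i or returns
def pvOuterB (srcSet : PySem.Set Char) (s t : List Char) (n : Nat) :
    Nat → Int → Nat → Int
  | 0, count, _ => count
  | fuel + 1, count, i =>
    if i < n then
      if t[i]! ∈ srcSet then pvOuterB srcSet s t n fuel (count + 1) (pvScanB t s i)
      else -1
    else count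

def min_subsequences_alt (source : String) (target : String) : Int :=
  let s := source.toList
  let t := target.toList
  pvOuterB (PySem.Set.ofList s) s t t.length (t.length + 1) 0 0

-- ===== PRECONDITION & SPEC =====
def Spec_min_subsequences (source : String) (target : String) (out : Int) : Prop := out = min_subsequences_alt source target
instance (source : String) (target : String) (out : Int) : Decidable (Spec_min_subsequences source target out) := by unfold Spec_min_subsequences; infer_instance

-- ===== CLAIM (what is proved, stated in full; the proofs are below) =====
def Claim_equal_min_subsequences : Prop := ∀ (source : String) (target : String), Dom_min_subsequences source target → Spec_min_subsequences source target (min_subsequences source target)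

-- ===== LEMMAS AND PROOFS =====

-- occurrence indices of c in s, offset k (characterizes A's char_index_map entries)
def pvOcc (s : List Char) (c : Char) (k : Int) : List Int :=
  match s with
  | [] => []
  | a :: l => if a = c then k :: pvOcc l c (k + 1) else pvOcc l c (k + 1)

theorem pvOcc_mem (s : List Char) (c : Char) (k : Int) (e : Int) :
    e ∈ pvOcc s c k ↔ ∃ q : Nat, q < s.length ∧ e = k + q ∧ s[q]! = c := by
  induction s generalizing k e with
  | nil => simp [pvOcc]
  | cons a l ih =>
    simp only [pvOcc]
    constructor
    · intro he
      split at he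
      · rcases List.mem_cons.1 he with rfl | he'
        · exact ⟨0, by simp, by simp, by simpa⟩
        · obtain ⟨q, hq, rfl, hc⟩ := (ih (k + 1) _).1 he'
          exact ⟨q + 1, by simp; omega, by push_cast; ring, by simpa using hc⟩
      · obtain ⟨q, hq, rfl, hc⟩ := (ih (k + 1) _).1 he
        exact ⟨q + 1, by simp; omega, by push_cast; ring, by simpa using hc⟩
    · rintro ⟨q, hq, rfl, hc⟩
      cases q with
      | zero =>
        simp at hc
        simp [hc]
      | succ q =>
        have hm := (ih (k + 1) _).2 ⟨q, by simp at hq; omega, rfl, by simpa using hc⟩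
        have he : k + ((q : Int) + 1) = k + 1 + q := by ring
        push_cast
        rw [he]
        split
        · exact List.mem_cons_of_mem _ hm
        · exact hm

theorem pvOcc_pairwise (s : List Char) (c : Char) (k : Int) :
    (pvOcc s c k).Pairwise (· < ·) := by
  induction s generalizing k with
  | nil => simp [pvOcc]
  | cons a l ih =>
    simp only [pvOcc]
    split
    · refine List.pairwise_cons.2 ⟨?_, ih (k + 1)⟩
      intro e he
      obtain ⟨q, _, rfl, _⟩ := (pvOcc_mem l c (k + 1) e).1 he
      omega
    · exact ih (k + 1)

theorem pvBuild_getD_gen (s : List Char) (c : Char) (k : Int)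
    (d : PySem.Dict Char (List Int)) :
    ((PySem.List.enumerate s k).foldl
      (fun d p => d.modify p.2 [] (· ++ [p.1])) d).getD c []
      = d.getD c [] ++ pvOcc s c k := by
  induction s generalizing k d with
  | nil => simp [pvOcc, PySem.List.enumerate_nil]
  | cons a l ih =>
    rw [PySem.List.enumerate_cons]
    simp only [List.foldl_cons, pvOcc]
    rw [ih]
    by_cases hac : a = c
    · subst hac
      rw [if_pos rfl, PySem.Dict.getD_modify_self]
      simp
    · rw [if_neg hac, PySem.Dict.getD_modify_of_ne]
      exact fun h => hac h.symm

theorem pvBuild_contains_gen (s : List Char) (c : Char) (k : Int)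
    (d : PySem.Dict Char (List Int)) :
    ((PySem.List.enumerate s k).foldl
      (fun d p => d.modify p.2 [] (· ++ [p.1])) d).contains c
      = (d.contains c || decide (c ∈ s)) := by
  induction s generalizing k d with
  | nil => simp [PySem.List.enumerate_nil]
  | cons a l ih =>
    rw [PySem.List.enumerate_cons]
    simp only [List.foldl_cons]
    rw [ih, PySem.Dict.contains_modify]
    by_cases hac : a = c
    · subst hac; simp
    · have : (c == a) = false := by simpa using Ne.symm hac
      have h2 : decide (c = a) = false := by simpa using Ne.symm hac
      simp [this, h2]

theorem pvBsGo_spec (lst : List Int) (x : Int) (hs : lst.Pairwise (· < ·))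
    (lo hi : Nat) (hlo : ∀ q, q < lo → ∀ h : q < lst.length, lst[q] < x)
    (hhi : ∀ q, hi ≤ q → ∀ h : q < lst.length, x ≤ lst[q])
    (hb : lo ≤ hi) (hh : hi ≤ lst.length) :
    (∀ q, q < pvBsGo lst x lo hi → ∀ h : q < lst.length, lst[q] < x) ∧
    (∀ q, pvBsGo lst x lo hi ≤ q → ∀ h : q < lst.length, x ≤ lst[q]) ∧
    pvBsGo lst x lo hi ≤ lst.length := by
  have hmono : ∀ (a b : Nat) (ha : a < lst.length) (hb' : b < lst.length), a ≤ b → lst[a] ≤ lst[b] := by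
    intro a b ha hb' hab
    rcases Nat.lt_or_ge a b with h | h
    · exact le_of_lt (List.pairwise_iff_getElem.1 hs a b ha hb' h)
    · have : a = b := by omega
      subst this; rfl
  fun_induction pvBsGo lst x lo hi with
  | case1 lo hi h mid hlt ih =>
    have hmlt : mid < lst.length := by omega
    have hget : lst[mid]! = lst[mid] := getElem!_pos lst mid hmlt
    refine ih ?_ hhi (by omega) hh
    intro q hq hql
    have : lst[q] ≤ lst[mid] := hmono q mid hql hmlt (by omega)
    omega
  | case2 lo hi h mid hge ih =>
    have hmlt : mid < lst.length := by omega
    have hget : lst[mid]! = lst[mid] := getElem!_pos lst mid hmlt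
    refine ih hlo ?_ (by omega) (by omega)
    intro q hq hql
    have : lst[mid] ≤ lst[q] := hmono mid q hmlt hql (by omega)
    rw [hget] at hge
    omega
  | case3 lo hi h =>
    exact ⟨fun q hq hql => hlo q hq hql, fun q hq hql => hhi q (by omega) hql, by omega⟩

theorem pvScan_le (t s : List Char) (i : Nat) : i ≤ pvScanB t s i := by
  induction s generalizing i with
  | nil => simp [pvScanB]
  | cons a l ih =>
    simp only [pvScanB, List.foldl_cons]
    split
    · exact le_trans (by omega) (ih (i + 1))
    · exact ih i

theorem pvScan_frozen (t s : List Char) (i : Nat)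
    (h : ∀ ch ∈ s, t[i]? ≠ some ch) : pvScanB t s i = i := by
  induction s with
  | nil => rfl
  | cons a l ih =>
    simp only [pvScanB, List.foldl_cons]
    rw [if_neg (h a (by simp))]
    exact ih fun ch hch => h ch (by simp [hch])

theorem pvScan_append (t l1 l2 : List Char) (i : Nat) :
    pvScanB t (l1 ++ l2) i = pvScanB t l2 (pvScanB t l1 i) := by
  simp [pvScanB, List.foldl_append]

theorem pvFirstOcc (s : List Char) (c : Char) (p : Int) :
    (binary_search (pvOcc s c 0) p = (pvOcc s c 0).length →
       ∀ q : Nat, q < s.length → p ≤ (q : Int) → s[q]! ≠ c) ∧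
    (binary_search (pvOcc s c 0) p < (pvOcc s c 0).length →
       ∃ q0 : Nat, (pvOcc s c 0)[binary_search (pvOcc s c 0) p]! = (q0 : Int) ∧
         p ≤ (q0 : Int) ∧ q0 < s.length ∧ s[q0]! = c ∧
         ∀ q : Nat, q < q0 → p ≤ (q : Int) → s[q]! ≠ c) ∧
    binary_search (pvOcc s c 0) p ≤ (pvOcc s c 0).length := by
  set lst := pvOcc s c 0 with hlst
  have hpw : lst.Pairwise (· < ·) := pvOcc_pairwise s c 0
  have spec := pvBsGo_spec lst p hpw 0 lst.length
    (by intro q hq _; omega) (by intro q hq h; omega) (by omega) le_rfl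
  have hbs : binary_search lst p = pvBsGo lst p 0 lst.length := rfl
  rw [hbs]
  set r := pvBsGo lst p 0 lst.length with hr
  obtain ⟨s1, s2, s3⟩ := spec
  have hmemq : ∀ q : Nat, q < s.length → s[q]! = c → (q : Int) ∈ lst := by
    intro q hq hqc
    exact (pvOcc_mem s c 0 q).2 ⟨q, hq, by simp, hqc⟩
  refine ⟨?_, ?_, s3⟩
  · intro hrl q hq hpq hqc
    obtain ⟨m, hm, hme⟩ := List.mem_iff_getElem.1 (hmemq q hq hqc)
    have := s1 m (by omega) hm
    omega
  · intro hrlt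
    have hrg : lst[r]! = lst[r] := getElem!_pos lst r hrlt
    have hplr : p ≤ lst[r] := s2 r le_rfl hrlt
    obtain ⟨q0, hq0, he, hc0⟩ := (pvOcc_mem s c 0 _).1 (List.getElem_mem hrlt)
    refine ⟨q0, by rw [hrg]; omega, by omega, hq0, hc0, ?_⟩
    
    intro q hq hpq hqc
    obtain ⟨m, hm, hme⟩ := List.mem_iff_getElem.1 (hmemq q (by omega) hqc)
    rcases Nat.lt_or_ge m r with h | h
    · have := s1 m h hm
      omega
    · have : lst[r] ≤ lst[m] := by
        rcases Nat.lt_or_ge r m with h' | h'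
        · exact le_of_lt (List.pairwise_iff_getElem.1 hpw r m hrlt hm h')
        · have : r = m := by omega
          subst this; rfl
      omega

theorem pvPass (s t : List Char) (K : Nat) :
    ∀ (p : Int) (i : Nat), 0 ≤ p → s.length - p.toNat ≤ K →
    (∀ i', pvInnerA ((PySem.List.enumerate s 0).foldl
        (fun d q => d.modify q.2 [] (· ++ [q.1])) PySem.Dict.empty) t t.length i p = some i' →
      pvScanB t (s.drop p.toNat) i = i') ∧
    (pvInnerA ((PySem.List.enumerate s 0).foldl
        (fun d q => d.modify q.2 [] (· ++ [q.1])) PySem.Dict.empty) t t.length i p = none →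
      pvScanB t (s.drop p.toNat) i < t.length ∧
      t[pvScanB t (s.drop p.toNat) i]! ∉ s) := by
  induction K with
  | zero =>
    intro p i hp hK
    have hdrop : s.drop p.toNat = [] := List.drop_eq_nil_of_le (by omega)
    rw [hdrop]
    by_cases hin : i < t.length
    · have hti : t[i]! = t[i] := getElem!_pos t i hin
      rw [pvInnerA, dif_pos hin]
      simp only [hti, pvBuild_contains_gen, pvBuild_getD_gen, PySem.Dict.contains_empty,
        PySem.Dict.getD_empty, Bool.false_or, List.nil_append]
      by_cases hcs : t[i] ∈ s
      · rw [if_neg (by simp [hcs])]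
        obtain ⟨f1, f2, f3⟩ := pvFirstOcc s t[i] p
        have hj : binary_search (pvOcc s t[i] 0) p = (pvOcc s t[i] 0).length := by
          by_contra hne
          obtain ⟨q0, _, hpq0, hq0len, _, _⟩ := f2 (lt_of_le_of_ne f3 hne)
          omega
        rw [if_pos hj]
        constructor
        · intro i' h
          injection h with h
        · intro h
          simp at h
      · rw [if_pos (by simp [hcs])]
        constructor
        · intro i' h
          simp at h
        · intro _
          refine ⟨hin, ?_⟩
          show t[i]! ∉ s
          rw [hti]
          exact hcs
    · rw [pvInnerA, dif_neg hin]
      constructor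
      · intro i' h
        injection h with h
      · intro h
        simp at h
  | succ K ih =>
    intro p i hp hK
    by_cases hin : i < t.length
    · have hti : t[i]! = t[i] := getElem!_pos t i hin
      have htig : t[i]? = some t[i] := List.getElem?_eq_getElem hin
      rw [pvInnerA, dif_pos hin]
      simp only [hti, pvBuild_contains_gen, pvBuild_getD_gen, PySem.Dict.contains_empty,
        PySem.Dict.getD_empty, Bool.false_or, List.nil_append]
      by_cases hcs : t[i] ∈ s
      · rw [if_neg (by simp [hcs])]
        obtain ⟨f1, f2, f3⟩ := pvFirstOcc s t[i] p
        by_cases hj : binary_search (pvOcc s t[i] 0) p = (pvOcc s t[i] 0).length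
        · rw [if_pos hj]
          have hfr : pvScanB t (s.drop p.toNat) i = i := by
            apply pvScan_frozen
            intro ch hch
            obtain ⟨m, hm, rfl⟩ := List.mem_iff_getElem.1 hch
            rw [List.getElem_drop, htig]
            intro hcon
            have hm2 := hm
            rw [List.length_drop] at hm2
            have hml : p.toNat + m < s.length := by clear hcon hch hm f1 f2 f3 hj; omega
            refine f1 hj (p.toNat + m) hml (le_trans (Int.self_le_toNat p) (Int.ofNat_le.2 (Nat.le_add_right _ _))) ?_
            rw [getElem!_pos s _ hml]
            injection hcon with h
            exact h.symm
          exact ⟨fun i' h => by injection h with h; rw [hfr, h], fun h => by simp at h⟩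
        · rw [if_neg hj]
          obtain ⟨q0, hq0e, hpq0, hq0len, hq0c, hmin⟩ := f2 (lt_of_le_of_ne f3 hj)
          rw [hq0e]
          have hple : p.toNat ≤ q0 := by omega
          have hq01 : (0 : Int) ≤ (q0 : Int) + 1 := by positivity
          have htn : ((q0 : Int) + 1).toNat = q0 + 1 := by omega
          have hmeas : s.length - ((q0 : Int) + 1).toNat ≤ K := by
            rw [htn]; clear htn hq01 hq0e f1 f2 f3; omega
          have hscan : pvScanB t (s.drop p.toNat) i
              = pvScanB t (s.drop (q0 + 1)) (i + 1) := by
            have hsplit : s.drop p.toNat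
                = ((s.drop p.toNat).take (q0 - p.toNat)) ++ s.drop q0 := by
              conv_lhs => rw [← List.take_append_drop (q0 - p.toNat) (s.drop p.toNat)]
              rw [List.drop_drop]
              congr 2
              omega
            rw [hsplit, pvScan_append]
            have hfr : pvScanB t ((s.drop p.toNat).take (q0 - p.toNat)) i = i := by
              apply pvScan_frozen
              intro ch hch
              obtain ⟨m, hm, rfl⟩ := List.mem_iff_getElem.1 hch
              have hm2 := hm
              rw [List.length_take] at hm2
              have hmlt : m < q0 - p.toNat := by clear hch hm f1 f2 f3; omega
              have hml : p.toNat + m < s.length := by clear hch hm f1 f2 f3; omega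
              rw [List.getElem_take, List.getElem_drop, htig]
              intro hcon
              refine hmin (p.toNat + m) (by clear hcon hch hm f1 f2 f3; omega) (le_trans (Int.self_le_toNat p) (Int.ofNat_le.2 (Nat.le_add_right _ _))) ?_
              rw [getElem!_pos s _ hml]
              injection hcon with h
              exact h.symm
            have hq0c' : s[q0] = t[i] := by rw [← getElem!_pos s q0 hq0len]; exact hq0c
            rw [hfr, List.drop_eq_getElem_cons hq0len, hq0c']
            simp [pvScanB, htig]
          rw [hscan, ← htn]
          exact ih ((q0 : Int) + 1) (i + 1) hq01 hmeas
      · rw [if_pos (by simp [hcs])]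
        refine ⟨fun i' h => by simp at h, fun _ => ?_⟩
        have hfr : pvScanB t (s.drop p.toNat) i = i := by
          apply pvScan_frozen
          intro ch hch
          rw [htig]
          intro hcon
          exact hcs (by injection hcon with h; exact h ▸ List.mem_of_mem_drop hch)
        rw [hfr]
        exact ⟨hin, by rw [hti]; exact hcs⟩
    · rw [pvInnerA, dif_neg hin]
      have hfr : pvScanB t (s.drop p.toNat) i = i := by
        apply pvScan_frozen
        intro ch _
        rw [List.getElem?_eq_none (by omega)]
        simp
      exact ⟨fun i' h => by injection h with h; rw [hfr, h], fun h => by simp at h⟩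

theorem pvScan_progress (t s : List Char) (i : Nat) (c : Char)
    (h : t[i]? = some c) (hc : c ∈ s) : i + 1 ≤ pvScanB t s i := by
  induction s with
  | nil => simp at hc
  | cons a l ih =>
    simp only [pvScanB, List.foldl_cons]
    by_cases ha : t[i]? = some a
    · rw [if_pos ha]
      exact pvScan_le t l (i + 1)
    · rw [if_neg ha]
      rcases List.mem_cons.1 hc with rfl | hcl
      · exact absurd h ha
      · exact ih hcl

theorem pvOuter_eq (s t : List Char) (k : Nat) :
    ∀ i, t.length - i ≤ k → ∀ fa fb : Nat, t.length - i < fa → t.length - i < fb →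
    ∀ count : Int,
    pvOuterA ((PySem.List.enumerate s 0).foldl
        (fun d q => d.modify q.2 [] (· ++ [q.1])) PySem.Dict.empty) t t.length fa count i
      = pvOuterB (PySem.Set.ofList s) s t t.length fb count i := by
  induction k with
  | zero =>
    intro i hi fa fb hfa hfb count
    obtain ⟨fa', rfl⟩ : ∃ fa', fa = fa' + 1 := ⟨fa - 1, by omega⟩
    obtain ⟨fb', rfl⟩ : ∃ fb', fb = fb' + 1 := ⟨fb - 1, by omega⟩
    have hin : ¬ i < t.length := by omega
    simp [pvOuterA, pvOuterB, hin]
  | succ k ih =>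
    intro i hi fa fb hfa hfb count
    obtain ⟨fa', rfl⟩ : ∃ fa', fa = fa' + 1 := ⟨fa - 1, by omega⟩
    obtain ⟨fb', rfl⟩ : ∃ fb', fb = fb' + 1 := ⟨fb - 1, by omega⟩
    by_cases hin : i < t.length
    · have hti : t[i]! = t[i] := getElem!_pos t i hin
      have htig : t[i]? = some t[i] := List.getElem?_eq_getElem hin
      simp only [pvOuterA, pvOuterB, if_pos hin]
      obtain ⟨P1, P2⟩ := pvPass s t s.length 0 i (le_refl 0) (by simp)
      by_cases hcs : t[i] ∈ s
      · have hmem : t[i]! ∈ PySem.Set.ofList s := by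
          rw [hti]; exact (PySem.Set.mem_ofList _ _).2 hcs
        rw [if_pos hmem]
        cases hA : pvInnerA ((PySem.List.enumerate s 0).foldl
            (fun d q => d.modify q.2 [] (· ++ [q.1])) PySem.Dict.empty) t t.length i 0 with
        | none =>
          obtain ⟨hlt, hnot⟩ := P2 hA
          obtain ⟨fb'', rfl⟩ : ∃ x, fb' = x + 1 := ⟨fb' - 1, by omega⟩
          have hlt' : pvScanB t s i < t.length := hlt
          have hnot' : t[pvScanB t s i]! ∉ s := hnot
          simp only [pvOuterB, if_pos hlt']
          rw [if_neg (fun hmm => hnot' ((PySem.Set.mem_ofList _ _).1 hmm))]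
        | some i' =>
          have hscan : pvScanB t s i = i' := P1 i' hA
          have hprog : i + 1 ≤ i' := by
            rw [← hscan]
            exact pvScan_progress t s i t[i] htig hcs
          rw [hscan]
          exact ih i' (by omega) fa' fb' (by omega) (by omega) (count + 1)
      · have hmem : t[i]! ∉ PySem.Set.ofList s := by
          rw [hti]; exact fun hmm => hcs ((PySem.Set.mem_ofList _ _).1 hmm)
        rw [if_neg hmem]
        have hA : pvInnerA ((PySem.List.enumerate s 0).foldl
            (fun d q => d.modify q.2 [] (· ++ [q.1])) PySem.Dict.empty) t t.length i 0 = none := by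
          rw [pvInnerA, dif_pos hin]
          simp only [hti, pvBuild_contains_gen, PySem.Dict.contains_empty, Bool.false_or]
          rw [if_pos (by simp [hcs])]
        rw [hA]
    · have hin' : ¬ i < t.length := hin
      simp [pvOuterA, pvOuterB, hin']

-- ===== VERDICT (by name: the statement is the Claim_ definition above) =====
theorem min_subsequences_spec : Claim_equal_min_subsequences := by
  intro source target _
  unfold Spec_min_subsequences min_subsequences min_subsequences_alt
  exact pvOuter_eq source.toList target.toList target.toList.length 0 (by omega)
    _ _ (by omega) (by omega) 0
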